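-- pv_equiv track=rewrite | github.com/an-bruh/processamento-da-informacao | ep-avaliativo/Lista 7/Q4.py | calculaSomaCasas
-- ===== SOURCE A (Python) =====
-- def calculaSomaCasas(tabuleiro):
--   casaspretas = 0
--   casasbrancas = 0
--
--   for i in range(2):
--     for j in range(i, len(tabuleiro), 2):
--       for k in range(len(tabuleiro[j])):
--         if k % 2 == 0:
--           if tabuleiro[j][k] % 2 == 0:
--             if i % 2 == 0:
--               casaspretas += tabuleiro[j][k]
--             else:
--               casasbrancas += tabuleiro[j][k]
--         else:
--           if tabuleiro[j][k] % 2 == 0: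
--             if i % 2 == 0:
--               casasbrancas += tabuleiro[j][k]
--             else:
--               casaspretas += tabuleiro[j][k]
--
--   return casaspretas, casasbrancas
-- ===== SOURCE B (Python) =====
-- def calculaSomaCasas(tabuleiro):
--     pretas = sum(v for j, row in enumerate(tabuleiro) for k, v in enumerate(row)
--                  if v % 2 == 0 and (j + k) % 2 == 0)
--     brancas = sum(v for j, row in enumerate(tabuleiro) for k, v in enumerate(row)
--                   if v % 2 == 0 and (j + k) % 2 == 1)
--     return pretas, brancas
-- ===== Notes on version B (the rewrite author's own statement) =====
-- stated objective: simpler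
-- what changed: Replaces A's three nested loops (an outer i-pass partitioning rows into even/odd with i-dependent branch logic) by two flat generator sums over enumerated cells classified by one (j+k) parity test.
import Mathlib
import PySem

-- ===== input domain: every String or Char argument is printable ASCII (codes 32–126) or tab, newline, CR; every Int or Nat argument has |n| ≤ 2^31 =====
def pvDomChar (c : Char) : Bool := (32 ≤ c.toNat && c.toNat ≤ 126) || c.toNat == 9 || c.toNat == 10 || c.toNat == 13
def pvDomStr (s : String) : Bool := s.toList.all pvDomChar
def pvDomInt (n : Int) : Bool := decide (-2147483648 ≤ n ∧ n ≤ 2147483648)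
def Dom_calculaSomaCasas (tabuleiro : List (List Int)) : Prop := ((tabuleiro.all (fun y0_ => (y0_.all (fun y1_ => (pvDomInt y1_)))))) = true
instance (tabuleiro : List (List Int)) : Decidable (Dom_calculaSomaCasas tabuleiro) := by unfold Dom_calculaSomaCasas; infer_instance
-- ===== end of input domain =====

-- B replaces A's three nested loops (outer i-pass over row parities with i-dependent branches)
-- by two flat generator sums over enumerated cells classified by one (j+k) parity test; objective: simpler.

-- ===== PORT A =====
def calculaSomaCasas (tabuleiro : List (List Int)) : Int × Int :=
  (PySem.List.pyRange 0 2 1).foldl (fun acc2 i =>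
    (PySem.List.pyRange i (PySem.List.len tabuleiro) 2).foldl (fun acc1 j =>
      (PySem.List.pyRange 0 (PySem.List.len (PySem.List.pyGetD tabuleiro j [])) 1).foldl (fun acc k =>
        let v := PySem.List.pyGetD (PySem.List.pyGetD tabuleiro j []) k 0
        if PySem.Int.mod k 2 == 0 then
          if PySem.Int.mod v 2 == 0 then
            if PySem.Int.mod i 2 == 0 then (acc.1 + v, acc.2) else (acc.1, acc.2 + v)
          else acc
        else
          if PySem.Int.mod v 2 == 0 then
            if PySem.Int.mod i 2 == 0 then (acc.1, acc.2 + v) else (acc.1 + v, acc.2)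
          else acc
      ) acc1
    ) acc2
  ) ((0 : Int), (0 : Int))

-- ===== PORT B =====
def calculaSomaCasas_alt (tabuleiro : List (List Int)) : Int × Int :=
  let pretas := ((PySem.List.enumerate tabuleiro).flatMap (fun jr =>
      (PySem.List.enumerate jr.2).filterMap (fun kv =>
        if PySem.Int.mod kv.2 2 == 0 && PySem.Int.mod (jr.1 + kv.1) 2 == 0 then some kv.2 else none))).sum
  let brancas := ((PySem.List.enumerate tabuleiro).flatMap (fun jr =>
      (PySem.List.enumerate jr.2).filterMap (fun kv =>
        if PySem.Int.mod kv.2 2 == 0 && PySem.Int.mod (jr.1 + kv.1) 2 == 1 then some kv.2 else none))).sum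
  (pretas, brancas)

-- ===== PRECONDITION & SPEC =====
def Spec_calculaSomaCasas (tabuleiro : List (List Int)) (out : Int × Int) : Prop := out = calculaSomaCasas_alt tabuleiro
instance (tabuleiro : List (List Int)) (out : Int × Int) : Decidable (Spec_calculaSomaCasas tabuleiro out) := by unfold Spec_calculaSomaCasas; infer_instance

-- ===== CLAIM (what is proved, stated in full; the proofs are below) =====
def Claim_equal_calculaSomaCasas : Prop := ∀ (tabuleiro : List (List Int)), Dom_calculaSomaCasas tabuleiro → Spec_calculaSomaCasas tabuleiro (calculaSomaCasas tabuleiro)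

-- ===== LEMMAS AND PROOFS =====

theorem mod2 (a : Int) : PySem.Int.mod a 2 = a % 2 := PySem.Int.mod_eq_emod_of_pos (by norm_num)

-- per-cell contributions (B's classification) and per-row sums
def cellP (j : Int) (kv : Int × Int) : Int :=
  if PySem.Int.mod kv.2 2 == 0 && PySem.Int.mod (j + kv.1) 2 == 0 then kv.2 else 0
def cellB (j : Int) (kv : Int × Int) : Int :=
  if PySem.Int.mod kv.2 2 == 0 && PySem.Int.mod (j + kv.1) 2 == 1 then kv.2 else 0
def rowP (j : Int) (row : List Int) : Int := ((PySem.List.enumerate row).map (cellP j)).sum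
def rowB (j : Int) (row : List Int) : Int := ((PySem.List.enumerate row).map (cellB j)).sum
def pairStep (i : Int) (acc : Int × Int) (kv : Int × Int) : Int × Int :=
  (acc.1 + cellP i kv, acc.2 + cellB i kv)

theorem rowP_parity (j j' : Int) (row : List Int) (h : j % 2 = j' % 2) :
    rowP j row = rowP j' row := by
  unfold rowP
  congr 1
  refine List.map_congr_left fun kv _ => ?_
  unfold cellP
  simp only [mod2]
  have : (j + kv.1) % 2 = (j' + kv.1) % 2 := by omega
  rw [this]

theorem rowB_parity (j j' : Int) (row : List Int) (h : j % 2 = j' % 2) :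
    rowB j row = rowB j' row := by
  unfold rowB
  congr 1
  refine List.map_congr_left fun kv _ => ?_
  unfold cellB
  simp only [mod2]
  have : (j + kv.1) % 2 = (j' + kv.1) % 2 := by omega
  rw [this]

-- A's k-loop (for a fixed pass i) adds the two per-row sums componentwise
theorem kloop_eq (i : Int) (row : List Int) (acc : Int × Int) :
    (PySem.List.pyRange 0 (PySem.List.len row) 1).foldl (fun acc k =>
        let v := PySem.List.pyGetD row k 0
        if PySem.Int.mod k 2 == 0 then
          if PySem.Int.mod v 2 == 0 then
            if PySem.Int.mod i 2 == 0 then (acc.1 + v, acc.2) else (acc.1, acc.2 + v)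
          else acc
        else
          if PySem.Int.mod v 2 == 0 then
            if PySem.Int.mod i 2 == 0 then (acc.1, acc.2 + v) else (acc.1 + v, acc.2)
          else acc) acc
      = (acc.1 + rowP i row, acc.2 + rowB i row) := by
  obtain ⟨a, b⟩ := acc
  have hbody : (fun (acc : Int × Int) (k : Int) =>
      let v := PySem.List.pyGetD row k 0
      if PySem.Int.mod k 2 == 0 then
        if PySem.Int.mod v 2 == 0 then
          if PySem.Int.mod i 2 == 0 then (acc.1 + v, acc.2) else (acc.1, acc.2 + v)
        else acc
      else
        if PySem.Int.mod v 2 == 0 then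
          if PySem.Int.mod i 2 == 0 then (acc.1, acc.2 + v) else (acc.1 + v, acc.2)
        else acc)
      = fun acc k => pairStep i acc (k, PySem.List.pyGetD row k 0) := by
    funext acc k
    show _ = pairStep i acc (k, PySem.List.pyGetD row k 0)
    simp only [pairStep, cellP, cellB, mod2]
    rcases Int.emod_two_eq k with hk | hk <;>
      rcases Int.emod_two_eq (PySem.List.pyGetD row k 0) with hv | hv <;>
      rcases Int.emod_two_eq i with hi | hi
    all_goals first
      | (have hik : (i + k) % 2 = 0 := by omega
         simp [hk, hv, hi, hik])
      | (have hik : (i + k) % 2 = 1 := by omega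
         simp [hk, hv, hi, hik])
  rw [hbody]
  rw [show List.foldl (fun acc k => pairStep i acc (k, PySem.List.pyGetD row k 0)) (a, b)
        (PySem.List.pyRange 0 (PySem.List.len row) 1)
      = List.foldl (pairStep i) (a, b)
        ((PySem.List.pyRange 0 (PySem.List.len row) 1).map (fun k => (k, PySem.List.pyGetD row k 0)))
      from (List.foldl_map).symm]
  rw [← PySem.List.enumerate_eq_map_pyRange row 0]
  rw [show pairStep i = fun (s : Int × Int) (e : Int × Int) => (s.1 + cellP i e, s.2 + cellB i e) from rfl]
  rw [PySem.List.foldl_prod_mk (f := fun (x : Int) (e : Int × Int) => x + cellP i e)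
      (g := fun (x : Int) (e : Int × Int) => x + cellB i e)]
  rw [PySem.List.foldl_add, PySem.List.foldl_add]
  simp [rowP, rowB]

-- the two step-2 ranges together are a permutation of range(n)
theorem interleave_perm (n : Nat) :
    (PySem.List.pyRange 0 (n : Int) 2 ++ PySem.List.pyRange 1 (n : Int) 2).Perm
      (PySem.List.pyRange 0 (n : Int) 1) := by
  have h2 : (0 : Int) < 2 := by norm_num
  have hnd : ∀ a : Int, (PySem.List.pyRange a (n : Int) 2).Nodup := by
    intro a
    rw [PySem.List.pyRange_of_pos a (n : Int) h2]
    refine List.Nodup.map ?_ List.nodup_range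
    intro x y hxy
    have h' : a + 2 * (x : Int) = a + 2 * (y : Int) := hxy
    omega
  refine (List.perm_ext_iff_of_nodup ?_ (PySem.List.nodup_pyRange_one 0 (n : Int))).mpr ?_
  · refine List.Nodup.append (hnd 0) (hnd 1) ?_
    intro x hx hx'
    rw [PySem.List.mem_pyRange_iff_of_pos h2] at hx hx'
    omega
  · intro x
    simp only [List.mem_append, PySem.List.mem_pyRange_iff_of_pos h2, PySem.List.mem_pyRange_one]
    omega

theorem interleave_sum (n : Nat) (g : Int → Int) :
    ((PySem.List.pyRange 0 (n : Int) 2).map g).sum + ((PySem.List.pyRange 1 (n : Int) 2).map g).sum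
      = ((PySem.List.pyRange 0 (n : Int) 1).map g).sum := by
  have h := ((interleave_perm n).map g).sum_eq
  simpa [List.map_append] using h

theorem sum_filterMap_if {α : Type} (l : List α) (c : α → Bool) (h : α → Int) :
    (l.filterMap (fun x => if c x then some (h x) else none)).sum
      = (l.map (fun x => if c x then h x else 0)).sum := by
  induction l with
  | nil => rfl
  | cons x t ih => by_cases hc : c x <;> simp [hc, ih]

theorem sum_flatMap' {α : Type} (l : List α) (f : α → List Int) :
    (l.flatMap f).sum = (l.map (fun x => (f x).sum)).sum := by
  induction l with
  | nil => rfl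
  | cons x t ih => simp [ih]

theorem rowSum_eqP (j : Int) (row : List Int) :
    ((PySem.List.enumerate row).filterMap (fun kv =>
        if PySem.Int.mod kv.2 2 == 0 && PySem.Int.mod (j + kv.1) 2 == 0 then some kv.2 else none)).sum
      = rowP j row := by
  rw [sum_filterMap_if]; rfl

theorem rowSum_eqB (j : Int) (row : List Int) :
    ((PySem.List.enumerate row).filterMap (fun kv =>
        if PySem.Int.mod kv.2 2 == 0 && PySem.Int.mod (j + kv.1) 2 == 1 then some kv.2 else none)).sum
      = rowB j row := by
  rw [sum_filterMap_if]; rfl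

-- ===== VERDICT (by name: the statement is the Claim_ definition above) =====
theorem calculaSomaCasas_spec : Claim_equal_calculaSomaCasas := by
  intro tab _
  unfold Spec_calculaSomaCasas
  -- A side
  rw [calculaSomaCasas]
  rw [show PySem.List.pyRange 0 2 1 = [0, 1] from by decide]
  simp only [List.foldl_cons, List.foldl_nil]
  simp only [kloop_eq]
  rw [PySem.List.foldl_prod_mk (f := fun (x : Int) (j : Int) => x + rowP 0 (PySem.List.pyGetD tab j []))
      (g := fun (x : Int) (j : Int) => x + rowB 0 (PySem.List.pyGetD tab j []))]
  rw [PySem.List.foldl_prod_mk (f := fun (x : Int) (j : Int) => x + rowP 1 (PySem.List.pyGetD tab j []))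
      (g := fun (x : Int) (j : Int) => x + rowB 1 (PySem.List.pyGetD tab j []))]
  rw [PySem.List.foldl_add, PySem.List.foldl_add, PySem.List.foldl_add, PySem.List.foldl_add]
  simp only [zero_add]
  -- replace the constant pass index by the running row index inside each sum
  have hrep : ∀ (i : Int), i = 0 ∨ i = 1 →
      (List.map (fun j => rowP i (PySem.List.pyGetD tab j [])) (PySem.List.pyRange i (PySem.List.len tab) 2)
        = List.map (fun j => rowP j (PySem.List.pyGetD tab j [])) (PySem.List.pyRange i (PySem.List.len tab) 2))
      ∧ (List.map (fun j => rowB i (PySem.List.pyGetD tab j [])) (PySem.List.pyRange i (PySem.List.len tab) 2)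
        = List.map (fun j => rowB j (PySem.List.pyGetD tab j [])) (PySem.List.pyRange i (PySem.List.len tab) 2)) := by
    intro i hi
    constructor <;>
      refine List.map_congr_left (fun j hj => ?_) <;>
      rw [PySem.List.mem_pyRange_iff_of_pos (by norm_num)] at hj
    · exact rowP_parity i j _ (by omega)
    · exact rowB_parity i j _ (by omega)
  rw [(hrep 0 (Or.inl rfl)).1, (hrep 1 (Or.inr rfl)).1, (hrep 0 (Or.inl rfl)).2, (hrep 1 (Or.inr rfl)).2]
  simp only [PySem.List.len_eq]
  rw [interleave_sum tab.length (fun j => rowP j (PySem.List.pyGetD tab j []))]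
  rw [interleave_sum tab.length (fun j => rowB j (PySem.List.pyGetD tab j []))]
  -- B side
  rw [calculaSomaCasas_alt]
  simp only [sum_flatMap', rowSum_eqP, rowSum_eqB]
  rw [PySem.List.enumerate_eq_map_pyRange tab ([] : List Int)]
  simp only [List.map_map, PySem.List.len_eq]
  rfl
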